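-- pv_equiv track=rewrite | github.com/AnteBarbaric/AuB | AuB_DomaciRad/Chapter3/BA3D.py | DeBruijn
-- ===== SOURCE A (Python) =====
-- def kmer(text, i, k):
--     return text[i:(i+k)]
--
-- def prefix(pattern):
--     return pattern[0:len(pattern)-1]
--
-- def suffix(pattern):
--     #substring of pattern without first letter
--     return pattern[1:]
--
-- def Lwindows(text,L):
--     windows=list()
--     for i in range (0,len(text)-L+1):
--         windows.append(kmer(text,i,L))
--     return windows
--
-- def DeBruijn(k,text):
--     adjacency=dict()
--     sortedWindows=sorted(Lwindows(text,k))
--     for window in sortedWindows: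
--         adjacency[prefix(window)]=[]
--     for window in sortedWindows:
--         adjacency[prefix(window)].append(suffix(window))
--     return  adjacency
-- ===== SOURCE B (Python) =====
-- def DeBruijn(k, text):
--     # One unsorted pass grouping each suffix under its prefix; sort only at the
--     # end (the distinct keys, and each small bucket) instead of sorting the
--     # whole k-mer list up front.
--     buckets = {}
--     for i in range(len(text) - k + 1):
--         w = text[i:i + k]
--         buckets.setdefault(w[:-1], []).append(w[1:])
--     return {p: sorted(buckets[p]) for p in sorted(buckets)}
-- ===== Notes on version B (the rewrite author's own statement) =====
-- stated objective: alternative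
-- what changed: A sorts the full k-mer list up front and then makes two dict-building passes over it (initialize every prefix to [], then append suffixes); B never sorts the k-mer list: it groups suffix under prefix in one unsorted setdefault pass over the text and only sorts at the end - the distinct keys once and each small bucket.
import Mathlib
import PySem

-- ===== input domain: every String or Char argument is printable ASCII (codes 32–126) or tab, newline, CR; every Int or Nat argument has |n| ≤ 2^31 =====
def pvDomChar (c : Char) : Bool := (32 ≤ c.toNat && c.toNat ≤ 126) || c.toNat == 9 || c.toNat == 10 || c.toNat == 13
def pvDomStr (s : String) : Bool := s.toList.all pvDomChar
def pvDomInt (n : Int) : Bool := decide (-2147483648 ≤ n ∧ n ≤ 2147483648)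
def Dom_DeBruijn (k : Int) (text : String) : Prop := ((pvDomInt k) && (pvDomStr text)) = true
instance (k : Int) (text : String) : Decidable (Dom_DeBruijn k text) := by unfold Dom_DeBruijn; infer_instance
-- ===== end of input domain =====

-- B replaces A's sort-all-k-mers-then-two-dict-passes by one unsorted grouping pass
-- (setdefault/append) followed by sorting only the distinct keys and each bucket.

-- ===== PORT A =====
def pvKmer (text : String) (i k : Int) : String :=
  PySem.Str.slice text (some i) (some (i + k))

def pvPrefixA (pattern : String) : String :=
  PySem.Str.slice pattern (some 0) (some (PySem.Str.len pattern - 1))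

def pvSuffixA (pattern : String) : String :=
  PySem.Str.slice pattern (some 1) none

def pvLwindows (text : String) (L : Int) : List String :=
  (PySem.List.pyRange 0 (PySem.Str.len text - L + 1) 1).foldl
    (fun ws i => ws ++ [pvKmer text i L]) []

def DeBruijn (k : Int) (text : String) : List (String × List String) :=
  let sortedWindows := PySem.List.sorted (pvLwindows text k) (fun w => w) false
  let d1 := sortedWindows.foldl
    (fun d w => d.insert (pvPrefixA w) ([] : List String)) PySem.Dict.empty
  -- `adjacency[prefix(window)].append(...)`: the key is always present (first loop inserted
  -- it), so the in-place append is exactly Dict.modify with default []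
  let d2 := sortedWindows.foldl
    (fun d w => d.modify (pvPrefixA w) [] (fun v => v ++ [pvSuffixA w])) d1
  d2.items

-- ===== PORT B =====
def DeBruijn_alt (k : Int) (text : String) : List (String × List String) :=
  -- `buckets.setdefault(w[:-1], []).append(w[1:])` is exactly Dict.modify with default []
  let buckets := (PySem.List.pyRange 0 (PySem.Str.len text - k + 1) 1).foldl
    (fun d i =>
      let w := PySem.Str.slice text (some i) (some (i + k))
      d.modify (PySem.Str.slice w none (some (-1))) []
        (fun v => v ++ [PySem.Str.slice w (some 1) none]))
    PySem.Dict.empty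
  -- the dict comprehension over sorted(buckets): build a dict from the sorted distinct keys
  (PySem.Dict.ofList
    ((PySem.List.sorted buckets.keys (fun p => p) false).map
      (fun p => (p, PySem.List.sorted (buckets.getD p []) (fun s => s) false)))).items

-- ===== PRECONDITION & SPEC =====
def Spec_DeBruijn (k : Int) (text : String) (out : List (String × List String)) : Prop := out = DeBruijn_alt k text
instance (k : Int) (text : String) (out : List (String × List String)) : Decidable (Spec_DeBruijn k text out) := by unfold Spec_DeBruijn; infer_instance

-- ===== CLAIM (what is proved, stated in full; the proofs are below) =====
def Claim_equal_DeBruijn : Prop := ∀ (k : Int) (text : String), Dom_DeBruijn k text → Spec_DeBruijn k text (DeBruijn k text)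

-- ===== LEMMAS AND PROOFS =====

-- the common normal form: sorted distinct prefixes, each with the suffixes of its windows
def pvCanon (ws : List String) : List (String × List String) :=
  (PySem.Set.ofList (ws.map pvPrefixA)).map
    (fun p => (p, (ws.filter (fun w => pvPrefixA w == p)).map pvSuffixA))

-- the window list, in text order
def pvWins (k : Int) (text : String) : List String :=
  (PySem.List.pyRange 0 (PySem.Str.len text - k + 1) 1).map
    (fun i => PySem.Str.slice text (some i) (some (i + k)))

def pvSortedW (k : Int) (text : String) : List String :=
  PySem.List.sorted (pvWins k text) (fun w => w) false

lemma pvLwindows_eq (text : String) (k : Int) : pvLwindows text k = pvWins k text := by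
  unfold pvLwindows pvWins pvKmer
  rw [PySem.List.foldl_append_singleton_eq_map]
  simp

lemma pvPrefixA_toList (w : String) : (pvPrefixA w).toList = w.toList.dropLast := by
  unfold pvPrefixA
  rw [PySem.Str.toList_slice, PySem.Chars.slice_eq_listSlice]
  simp only [PySem.List.slice_zero_start]
  rcases h : w.toList with _ | ⟨c, t⟩
  · simp [PySem.List.slice]
  · have hlen : PySem.Str.len w - 1 = ((c :: t).length - 1 : Nat) := by
      simp [PySem.Str.len_eq, h]
    rw [hlen, PySem.List.slice_to_natCast]
    exact List.dropLast_eq_take.symm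

lemma pvSuffixA_toList (w : String) : (pvSuffixA w).toList = w.toList.tail := by
  unfold pvSuffixA
  rw [PySem.Str.toList_slice, PySem.Chars.slice_eq_listSlice, PySem.List.slice_from_one]

lemma pvPrefix_neg_one (w : String) : PySem.Str.slice w none (some (-1)) = pvPrefixA w :=
  String.toList_injective (by rw [PySem.Str.slice_to_neg_one, pvPrefixA_toList])

-- ---------- A-side characterisation: A's result is pvCanon of the sorted window list ----------

lemma pvInsLoop (l : List String) (S : List String) :
    (l.foldl (fun d w => d.insert (pvPrefixA w) ([] : List String))
      (PySem.Dict.mk (S.map (fun p => (p, ([] : List String)))))) =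
    PySem.Dict.mk ((PySem.Set.update S (l.map pvPrefixA)).map (fun p => (p, []))) := by
  induction l generalizing S with
  | nil => simp [PySem.Set.update]
  | cons w t ih =>
    simp only [List.foldl_cons, List.map_cons]
    have hstep : (PySem.Dict.mk (S.map (fun p => (p, ([] : List String))))).insert (pvPrefixA w) []
        = PySem.Dict.mk ((PySem.Set.add S (pvPrefixA w)).map (fun p => (p, []))) := by
      by_cases hc : pvPrefixA w ∈ S
      · have hcont : (PySem.Dict.mk (S.map (fun p => (p, ([] : List String))))).contains (pvPrefixA w) = true := by
          rw [PySem.Dict.contains_iff_mem_keys]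
          simp [PySem.Dict.keys, hc]
        apply PySem.Dict.ext
        rw [PySem.Dict.items_insert]
        simp only [hcont, if_pos]
        have hS : PySem.Set.add S (pvPrefixA w) = S := by
          simp [PySem.Set.add, hc]
        rw [hS]
        show List.map _ (S.map (fun p => (p, ([] : List String)))) = _
        rw [List.map_map]
        apply List.map_congr_left
        intro p hp
        by_cases hpw : p = pvPrefixA w <;> simp [hpw]
      · have hcont : (PySem.Dict.mk (S.map (fun p => (p, ([] : List String))))).contains (pvPrefixA w) = false := by
          rw [← Bool.not_eq_true, PySem.Dict.contains_iff_mem_keys]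
          simp [PySem.Dict.keys, hc]
        apply PySem.Dict.ext
        rw [PySem.Dict.items_insert]
        simp only [hcont]
        have hS : PySem.Set.add S (pvPrefixA w) = S ++ [pvPrefixA w] := by
          simp [PySem.Set.add, hc]
        rw [hS]
        simp
    rw [hstep, ih]
    rfl

lemma pvSetUpdate_self (l : List String) (S : PySem.Set String) (h : ∀ x ∈ l, x ∈ S) :
    PySem.Set.update S l = S := by
  induction l generalizing S with
  | nil => rfl
  | cons a t ih =>
    have ha : PySem.Set.add S a = S := by simp [PySem.Set.add, h a (by simp)]
    show PySem.Set.update (PySem.Set.add S a) t = S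
    rw [ha]
    exact ih S (fun x hx => h x (by simp [hx]))

lemma pvItems_eq_keys_map (d : PySem.Dict String (List String)) (h : d.keys.Nodup) :
    d.items = d.keys.map (fun p => (p, d.getD p [])) := by
  have : d.keys.map (fun p => (p, d.getD p [])) = d.items.map (fun q => (q.1, d.getD q.1 [])) := by
    simp [PySem.Dict.keys, List.map_map]
  rw [this]
  symm
  calc d.items.map (fun q => (q.1, d.getD q.1 [])) = d.items.map id := by
        apply List.map_congr_left
        intro q hq
        have := PySem.Dict.getD_of_mem_items d (k := q.1) (v := q.2) (by simpa using hq) h []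
        simp [this]
    _ = d.items := List.map_id _

lemma pvA_char (ws : List String) :
    (ws.foldl (fun d w => d.modify (pvPrefixA w) [] (fun v => v ++ [pvSuffixA w]))
      (ws.foldl (fun d w => d.insert (pvPrefixA w) ([] : List String)) PySem.Dict.empty)).items
    = pvCanon ws := by
  have hempty : (PySem.Dict.empty : PySem.Dict String (List String))
      = PySem.Dict.mk (([] : List String).map (fun p => (p, []))) := rfl
  set S : List String := PySem.Set.ofList (ws.map pvPrefixA) with hS
  have hd1 : (ws.foldl (fun d w => d.insert (pvPrefixA w) ([] : List String)) PySem.Dict.empty)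
      = PySem.Dict.mk (S.map (fun p => (p, []))) := by
    rw [hempty, pvInsLoop]
    rfl
  rw [hd1]
  set d1 : PySem.Dict String (List String) := PySem.Dict.mk (S.map (fun p => (p, []))) with hd1'
  set d2 := ws.foldl (fun d w => d.modify (pvPrefixA w) [] (fun v => v ++ [pvSuffixA w])) d1 with hd2
  have hkeys1 : d1.keys = S := by
    rw [hd1']
    have hcomp : ((fun (x : String × List String) => x.1) ∘ fun p => (p, ([] : List String))) = id := rfl
    simp [PySem.Dict.keys, List.map_map, hcomp]
  have hkeys : d2.keys = S := by
    rw [hd2, PySem.Dict.keys_foldl_modify_key ws pvPrefixA [] (fun _ w => fun v => v ++ [pvSuffixA w]) d1, hkeys1]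
    exact pvSetUpdate_self _ _ (fun x hx => by rw [hS]; rw [PySem.Set.mem_ofList]; exact hx)
  have hnodup : d2.keys.Nodup := by rw [hkeys]; exact PySem.Set.nodup_ofList _
  have hgetD : ∀ p ∈ S, d2.getD p [] = (ws.filter (fun w => pvPrefixA w == p)).map pvSuffixA := by
    intro p hp
    have hfold : d2 = (ws.map (fun w => (pvPrefixA w, pvSuffixA w))).foldl
        (fun d q => d.modify q.1 [] (fun v => v ++ [q.2])) d1 := by
      rw [hd2, List.foldl_map]
    rw [hfold, PySem.Dict.getD_foldl_modify_append]
    have hd1getD : d1.getD p [] = [] := by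
      apply PySem.Dict.getD_of_mem_items d1 (v := []) _ (by rw [hkeys1, hS]; exact PySem.Set.nodup_ofList _)
      show (p, ([] : List String)) ∈ d1.items
      rw [hd1']
      exact List.mem_map.mpr ⟨p, hp, rfl⟩
    rw [hd1getD, List.nil_append, List.filter_map, List.map_map]
    rfl
  have := pvItems_eq_keys_map d2 hnodup
  rw [this, hkeys]
  unfold pvCanon
  rw [← hS]
  exact List.map_congr_left (fun p hp => by rw [hgetD p hp])

-- ---------- order facts ----------

lemma pvLexLt (c d : List Char) : c < d ↔ List.Lex (· < ·) c d :=
  Iff.intro (fun h => h) (fun h => h)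

lemma pvDropLast_lex (c d : List Char) (hlen : c.length = d.length)
    (h : List.Lex (· < ·) c.dropLast d.dropLast) : List.Lex (· < ·) c d := by
  induction c generalizing d with
  | nil =>
    have : d = [] := by
      cases d
      · rfl
      · simp at hlen
    subst this
    exact absurd h List.not_lex_nil
  | cons a c' ihc =>
    rcases d with _ | ⟨b, d'⟩
    · simp at hlen
    rcases c' with _ | ⟨a2, c''⟩
    · have : d' = [] := by simpa using hlen.symm
      subst this
      exact absurd h List.not_lex_nil
    rcases d' with _ | ⟨b2, d''⟩
    · simp at hlen
    rw [List.dropLast_cons₂, List.dropLast_cons₂] at h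
    cases h with
    | rel hab => exact List.Lex.rel hab
    | cons htail => exact List.Lex.cons (ihc _ (by simpa using hlen) htail)

lemma pvWins_len (k : Int) (text : String) :
    ∀ w ∈ pvWins k text, w.toList.length = 0 ∨
      (w.toList.length : Int) = (if k < 0 then (text.toList.length : Int) + k else k) := by
  intro w hw
  rcases List.mem_map.mp hw with ⟨i, hi, rfl⟩
  rcases PySem.List.mem_pyRange_one.mp hi with ⟨h0, hub⟩
  rw [PySem.Str.toList_slice, PySem.Chars.slice_eq_listSlice, PySem.List.length_slice]
  have hlen : PySem.Str.len text = (text.toList.length : Int) := by simp [PySem.Str.len_eq]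
  rw [hlen] at hub
  simp only [PySem.List.clampIdx]
  split_ifs <;> omega

lemma pvPrefix_mono (u v : String)
    (hlen : u.toList.length = v.toList.length ∨ u.toList = [] ∨ v.toList = [])
    (h : u ≤ v) : pvPrefixA u ≤ pvPrefixA v := by
  rcases hlen with hlen | hu | hv
  · rw [← not_lt]
    intro hlt
    have hlt' := String.lt_iff_toList_lt.mp hlt
    rw [pvPrefixA_toList, pvPrefixA_toList, pvLexLt] at hlt'
    have : v.toList < u.toList := (pvLexLt _ _).mpr (pvDropLast_lex _ _ hlen.symm hlt')
    exact absurd (String.lt_iff_toList_lt.mpr this) (not_lt.mpr h)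
  · have hpre : (pvPrefixA u).toList = [] := by rw [pvPrefixA_toList, hu]; rfl
    rw [← not_lt]
    intro hlt
    have hlt' := String.lt_iff_toList_lt.mp hlt
    rw [hpre, pvLexLt] at hlt'
    exact List.not_lex_nil hlt'
  · have huv : u.toList = [] := by
      by_contra hne
      rcases hl : u.toList with _ | ⟨a, t⟩
      · exact hne hl
      · have : v.toList < u.toList := by
          rw [pvLexLt, hv, hl]
          exact List.Lex.nil
        exact absurd (String.lt_iff_toList_lt.mpr this) (not_lt.mpr h)
    have h1 : (pvPrefixA u).toList = [] := by rw [pvPrefixA_toList, huv]; rfl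
    have h2 : (pvPrefixA v).toList = [] := by rw [pvPrefixA_toList, hv]; rfl
    have : pvPrefixA u = pvPrefixA v := String.toList_injective (h1.trans h2.symm)
    exact le_of_eq this

lemma pvSorted_prefix_pairwise (k : Int) (text : String) :
    ((pvSortedW k text).map pvPrefixA).Pairwise (· ≤ ·) := by
  rw [List.pairwise_map]
  apply List.Pairwise.imp_of_mem (fun {u v} hu hv huv => ?_)
    (PySem.List.sorted_pairwise (pvWins k text) (fun w => w))
  have hu' := (PySem.List.mem_sorted _ _ _ _).mp hu
  have hv' := (PySem.List.mem_sorted _ _ _ _).mp hv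
  apply pvPrefix_mono _ _ _ huv
  rcases pvWins_len k text u hu' with h1 | h1
  · right; left; exact List.length_eq_zero_iff.mp h1
  · rcases pvWins_len k text v hv' with h2 | h2
    · right; right; exact List.length_eq_zero_iff.mp h2
    · left; omega

-- appending a last char to the same stem compares by that char
lemma pvAppendLex (x : List Char) (c d : Char) :
    List.Lex (· < ·) (x ++ [c]) (x ++ [d]) ↔ c < d := by
  induction x with
  | nil =>
    constructor
    · intro h
      cases h with
      | rel h => exact h
      | cons h => exact absurd h List.not_lex_nil
    · intro h
      exact List.Lex.rel h
  | cons a t ih =>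
    constructor
    · intro h
      cases h with
      | rel h => exact absurd h (lt_irrefl a)
      | cons h => exact ih.mp h
    · intro h
      exact List.Lex.cons (ih.mpr h)

-- among windows sharing a prefix, window order is suffix order
lemma pvSuffix_mono (u v : String) (hp : pvPrefixA u = pvPrefixA v) (h : u ≤ v) :
    pvSuffixA u ≤ pvSuffixA v := by
  have hdl : u.toList.dropLast = v.toList.dropLast := by
    rw [← pvPrefixA_toList, ← pvPrefixA_toList, hp]
  by_cases hune : u.toList = []
  · -- suffix of "" is the least string
    have h1 : (pvSuffixA u).toList = [] := by rw [pvSuffixA_toList, hune]; rfl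
    rw [← not_lt]
    intro hlt
    have hlt' := String.lt_iff_toList_lt.mp hlt
    rw [h1, pvLexLt] at hlt'
    exact List.not_lex_nil hlt'
  · by_cases hvne : v.toList = []
    · -- v = "" forces u of length ≤ 1, so suffix u = ""
      have hthis : u.toList.dropLast = [] := by rw [hdl, hvne]; rfl
      have h1 : (pvSuffixA u).toList = [] := by
        rw [pvSuffixA_toList]
        rcases hu : u.toList with _ | ⟨a, us⟩
        · rfl
        · rw [hu] at hthis
          have hus0 : us = [] := by simpa using congrArg List.length hthis
          simp [hus0]
      rw [← not_lt]
      intro hlt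
      have hlt' := String.lt_iff_toList_lt.mp hlt
      rw [h1, pvLexLt] at hlt'
      exact List.not_lex_nil hlt'
    · -- both nonempty: u = x ++ [c], v = x ++ [d] with the same stem x
      obtain ⟨x, c, hus⟩ := (List.eq_nil_or_concat u.toList).resolve_left hune
      obtain ⟨y, d, hvs⟩ := (List.eq_nil_or_concat v.toList).resolve_left hvne
      simp only [List.concat_eq_append] at hus hvs
      have hxy : x = y := by
        have hdl' := hdl
        rw [hus, hvs, List.dropLast_concat, List.dropLast_concat] at hdl'
        exact hdl'
      subst hxy
      by_cases hxnil : x = []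
      · subst hxnil
        have h1 : (pvSuffixA u).toList = [] := by rw [pvSuffixA_toList, hus]; rfl
        have h2 : (pvSuffixA v).toList = [] := by rw [pvSuffixA_toList, hvs]; rfl
        exact le_of_eq (String.toList_injective (h1.trans h2.symm))
      · rw [← not_lt]
        intro hlt
        have hlt' := String.lt_iff_toList_lt.mp hlt
        rw [pvSuffixA_toList, pvSuffixA_toList, pvLexLt, hus, hvs,
          List.tail_append_of_ne_nil hxnil, List.tail_append_of_ne_nil hxnil] at hlt'
        have hdc := (pvAppendLex _ _ _).mp hlt'
        have hvu : v < u := by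
          apply String.lt_iff_toList_lt.mpr
          rw [pvLexLt, hus, hvs]
          exact (pvAppendLex _ _ _).mpr hdc
        exact absurd hvu (not_lt.mpr h)

-- ---------- B-side facts ----------

lemma pvOfList_append (l : List String) (x : String) :
    PySem.Set.ofList (l ++ [x]) = PySem.Set.add (PySem.Set.ofList l) x := by
  rw [PySem.Set.ofList_eq_foldl, PySem.Set.ofList_eq_foldl, List.foldl_append]
  rfl

lemma pvOfList_sublist (l : List String) : (PySem.Set.ofList l).Sublist l := by
  induction l using List.reverseRecOn with
  | nil => exact List.Sublist.refl _
  | append_singleton t x ih =>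
    rw [pvOfList_append]
    by_cases hx : x ∈ PySem.Set.ofList t
    · have : PySem.Set.add (PySem.Set.ofList t) x = PySem.Set.ofList t := by
        simp [PySem.Set.add, hx]
      rw [this]
      exact ih.trans (List.sublist_append_left t [x])
    · have : PySem.Set.add (PySem.Set.ofList t) x = PySem.Set.ofList t ++ [x] := by
        simp [PySem.Set.add, hx]
      rw [this]
      exact List.Sublist.append ih (List.Sublist.refl _)

-- B's key list: sorting the deduplicated prefixes gives the dedup of the sorted window prefixes
lemma pvKeysEq (k : Int) (text : String) :
    PySem.List.sorted (PySem.Set.ofList ((pvWins k text).map pvPrefixA)) (fun p => p) false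
      = PySem.Set.ofList ((pvSortedW k text).map pvPrefixA) := by
  apply PySem.List.sorted_id_eq_of_perm_of_pairwise
  · apply (List.perm_ext_iff_of_nodup (PySem.Set.nodup_ofList _) (PySem.Set.nodup_ofList _)).mpr
    intro p
    simp only [pvSortedW, PySem.Set.mem_ofList, List.mem_map, PySem.List.mem_sorted]
  · exact (pvSorted_prefix_pairwise k text).sublist (pvOfList_sublist _)

-- B's bucket for key p: sorting the text-order suffixes gives the sorted-order suffixes
lemma pvBucketEq (k : Int) (text : String) (p : String) :
    PySem.List.sorted (((pvWins k text).filter (fun w => pvPrefixA w == p)).map pvSuffixA)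
      (fun s => s) false
    = ((pvSortedW k text).filter (fun w => pvPrefixA w == p)).map pvSuffixA := by
  apply PySem.List.sorted_id_eq_of_perm_of_pairwise
  · exact ((PySem.List.sorted_perm (pvWins k text) (fun w => w) false).filter _).map _
  · rw [List.pairwise_map]
    have hsw : (pvSortedW k text).Pairwise (· ≤ ·) :=
      PySem.List.sorted_pairwise (pvWins k text) (fun w => w)
    have hf : ((pvSortedW k text).filter (fun w => pvPrefixA w == p)).Pairwise (· ≤ ·) :=
      hsw.sublist List.filter_sublist
    apply List.Pairwise.imp_of_mem (fun {u v} hu hv huv => ?_) hf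
    have hu' : pvPrefixA u = p := by simpa using (List.mem_filter.mp hu).2
    have hv' : pvPrefixA v = p := by simpa using (List.mem_filter.mp hv).2
    exact pvSuffix_mono u v (hu'.trans hv'.symm) huv

lemma pvCanon_fst (ws : List String) :
    (pvCanon ws).map Prod.fst = PySem.Set.ofList (ws.map pvPrefixA) := by
  unfold pvCanon
  rw [List.map_map]
  exact List.map_id _

lemma pvOfListItems (g : List (String × List String)) (h : (g.map Prod.fst).Nodup) :
    (PySem.Dict.ofList g).items = g := by
  have := PySem.Dict.items_foldl_insert_fresh g Prod.fst Prod.snd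
    (PySem.Dict.empty : PySem.Dict String (List String))
    (fun a _ => by simp [PySem.Dict.contains_empty]) h
  simpa using this

lemma pvB_char (k : Int) (text : String) : DeBruijn_alt k text = pvCanon (pvSortedW k text) := by
  -- the grouping fold over indices is the same fold over the window list
  have hfold : (PySem.List.pyRange 0 (PySem.Str.len text - k + 1) 1).foldl
      (fun d i =>
        (PySem.Dict.modify d (PySem.Str.slice (PySem.Str.slice text (some i) (some (i + k))) none (some (-1))) []
          (fun v => v ++ [PySem.Str.slice (PySem.Str.slice text (some i) (some (i + k))) (some 1) none])))
      (PySem.Dict.empty : PySem.Dict String (List String))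
      = (pvWins k text).foldl
        (fun d w => d.modify (pvPrefixA w) [] (fun v => v ++ [pvSuffixA w])) PySem.Dict.empty := by
    rw [pvWins, List.foldl_map]
    simp only [pvPrefix_neg_one]
    rfl
  set B0 := (pvWins k text).foldl
    (fun d w => d.modify (pvPrefixA w) [] (fun v => v ++ [pvSuffixA w]))
    (PySem.Dict.empty : PySem.Dict String (List String)) with hb
  have hkeys : B0.keys = PySem.Set.ofList ((pvWins k text).map pvPrefixA) := by
    rw [hb, PySem.Dict.keys_foldl_modify_key (pvWins k text) pvPrefixA []
      (fun _ w => fun v => v ++ [pvSuffixA w])]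
    rw [PySem.Dict.keys_empty, PySem.Set.update_nil_left]
  have hgetD : ∀ p, B0.getD p []
      = ((pvWins k text).filter (fun w => pvPrefixA w == p)).map pvSuffixA := by
    intro p
    have hpair : B0 = ((pvWins k text).map (fun w => (pvPrefixA w, pvSuffixA w))).foldl
        (fun d q => d.modify q.1 [] (fun v => v ++ [q.2])) PySem.Dict.empty := by
      rw [hb, List.foldl_map]
    rw [hpair, PySem.Dict.getD_foldl_modify_append, PySem.Dict.getD_empty, List.nil_append,
      List.filter_map, List.map_map]
    rfl
  simp only [DeBruijn_alt]
  rw [hfold, hkeys]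
  simp only [hgetD]
  rw [pvKeysEq k text]
  simp only [pvBucketEq k text]
  show (PySem.Dict.ofList (pvCanon (pvSortedW k text))).items = pvCanon (pvSortedW k text)
  exact pvOfListItems _ (by rw [pvCanon_fst]; exact PySem.Set.nodup_ofList _)

lemma pvMain (k : Int) (text : String) : DeBruijn k text = DeBruijn_alt k text := by
  unfold DeBruijn
  rw [pvLwindows_eq text k]
  rw [show PySem.List.sorted (pvWins k text) (fun w => w) false = pvSortedW k text from rfl]
  rw [pvA_char (pvSortedW k text), pvB_char k text]

-- ===== VERDICT (by name: the statement is the Claim_ definition above) =====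
theorem DeBruijn_spec : Claim_equal_DeBruijn := by
  intro k text _
  unfold Spec_DeBruijn
  exact pvMain k text
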